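-- pv_equiv track=rewrite | github.com/slovb/advent_of_code_2020 | 06/second.py | count
-- ===== SOURCE A (Python) =====
-- def count(group):
--     s = list(group[0])
--     remove = set()
--     for l in group[1:]:
--         for c in s:
--              if c not in l:
--                  remove.add(c)
--     return len(s) - len(remove)
-- ===== SOURCE B (Python) =====
-- def count(group):
--     first, rest = group[0], group[1:]
--     presence = {}
--     for l in rest:
--         for c in set(l):
--             presence[c] = presence.get(c, 0) + 1
--     missing = sum(1 for c in set(first) if presence.get(c, 0) < len(rest))
--     return len(first) - missing
-- ===== Notes on version B (the rewrite author's own statement) =====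
-- stated objective: alternative
-- what changed: Instead of re-scanning the first line's characters against every other line, B builds a char->line-presence counter in one pass over the other lines and then counts, per distinct char of the first line, whether its presence count falls short of the number of other lines; Pre_ excludes only the empty list, on which A raises IndexError.
import Mathlib
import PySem

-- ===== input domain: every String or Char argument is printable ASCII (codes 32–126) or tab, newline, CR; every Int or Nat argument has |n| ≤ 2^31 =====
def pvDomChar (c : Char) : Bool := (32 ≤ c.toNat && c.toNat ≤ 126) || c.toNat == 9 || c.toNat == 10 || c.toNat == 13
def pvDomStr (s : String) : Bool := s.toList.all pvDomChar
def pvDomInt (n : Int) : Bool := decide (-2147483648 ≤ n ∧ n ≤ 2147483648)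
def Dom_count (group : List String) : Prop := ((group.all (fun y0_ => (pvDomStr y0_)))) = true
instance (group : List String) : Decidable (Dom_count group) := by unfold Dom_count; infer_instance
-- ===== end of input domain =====

-- B replaces A's per-line rescans of the first line with a char->line-presence counter
-- built in one pass over the other lines (a different algorithm of similar measured cost).


-- ===== PORT A =====
def count (group : List String) : Int :=
  match group with
  | [] => 0   -- unreachable under Pre_count: Python raises IndexError on group[0]
  | g :: rest =>
    let s := g.toList
    let remove : PySem.Set Char :=
      rest.foldl (fun remove l =>
        s.foldl (fun r c => if !(l.toList.contains c) then PySem.Set.add r c else r) remove)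
        PySem.Set.empty
    (s.length : Int) - (remove.length : Int)

-- ===== PORT B =====
def count_alt (group : List String) : Int :=
  match group with
  | [] => 0   -- unreachable under Pre_count: Python raises IndexError on group[0]
  | g :: rest =>
    let first := g.toList
    let presence : PySem.Dict Char Int :=
      rest.foldl (fun d l =>
        (PySem.Set.ofList l.toList).foldl (fun d c => d.modify c 0 (· + 1)) d)
        PySem.Dict.empty
    let missing : Int :=
      ((PySem.Set.ofList first).filter
        (fun c => presence.getD c 0 < (rest.length : Int))).length
    (first.length : Int) - missing

-- ===== PRECONDITION & SPEC =====
-- Pre_ excludes only the empty list, on which Python A raises IndexError (group[0]).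
def Pre_count (group : List String) : Prop := group ≠ []
instance (group : List String) : Decidable (Pre_count group) := by unfold Pre_count; infer_instance
def pvWitness_count : List String := ["abca", "ab"]
def Spec_count (group : List String) (out : Int) : Prop := out = count_alt group
instance (group : List String) (out : Int) : Decidable (Spec_count group out) := by unfold Spec_count; infer_instance

-- ===== CLAIM (what is proved, stated in full; the proofs are below) =====
def Claim_equal_count : Prop := ∀ (group : List String), Dom_count group → Pre_count group → Spec_count group (count group)

-- ===== LEMMAS AND PROOFS =====

-- membership in A's inner loop (one line l, scanning the first line's chars)
theorem mem_inner (l : String) (s : List Char) (acc : PySem.Set Char) (x : Char) :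
    x ∈ s.foldl (fun r c => if !(l.toList.contains c) then PySem.Set.add r c else r) acc ↔
      x ∈ acc ∨ (x ∈ s ∧ x ∉ l.toList) := by
  induction s generalizing acc with
  | nil => simp
  | cons c s ih =>
    simp only [List.foldl_cons, ih]
    by_cases hc : c ∈ l.toList
    · simp only [List.contains_eq_mem, hc, decide_true, Bool.not_true, Bool.false_eq_true,
        if_false, List.mem_cons]
      constructor
      · rintro (h1 | ⟨h2, h3⟩)
        · exact Or.inl h1
        · exact Or.inr ⟨Or.inr h2, h3⟩
      · rintro (h1 | ⟨rfl | h2, h3⟩)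
        · exact Or.inl h1
        · exact absurd hc h3
        · exact Or.inr ⟨h2, h3⟩
    · simp only [List.contains_eq_mem, hc, decide_false, Bool.not_false, if_true,
        PySem.Set.mem_add, List.mem_cons]
      constructor
      · rintro ((h1 | rfl) | ⟨h2, h3⟩)
        · exact Or.inl h1
        · exact Or.inr ⟨Or.inl rfl, hc⟩
        · exact Or.inr ⟨Or.inr h2, h3⟩
      · rintro (h1 | ⟨rfl | h2, h3⟩)
        · exact Or.inl (Or.inl h1)
        · exact Or.inl (Or.inr rfl)
        · exact Or.inr ⟨h2, h3⟩

theorem nodup_inner (l : String) (s : List Char) (acc : PySem.Set Char) (h : acc.Nodup) :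
    (s.foldl (fun r c => if !(l.toList.contains c) then PySem.Set.add r c else r) acc).Nodup := by
  induction s generalizing acc with
  | nil => simpa
  | cons c s ih =>
    simp only [List.foldl_cons]
    apply ih
    split
    · exact PySem.Set.nodup_add _ _ h
    · exact h

-- membership in A's remove set
theorem mem_remove (rest : List String) (s : List Char) (acc : PySem.Set Char) (x : Char) :
    x ∈ rest.foldl (fun remove l =>
        s.foldl (fun r c => if !(l.toList.contains c) then PySem.Set.add r c else r) remove) acc ↔
      x ∈ acc ∨ (x ∈ s ∧ ∃ l ∈ rest, x ∉ l.toList) := by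
  induction rest generalizing acc with
  | nil => simp
  | cons l rest ih =>
    simp only [List.foldl_cons, ih, mem_inner]
    constructor
    · rintro ((h1 | ⟨h2, h3⟩) | ⟨h2, l', hl', h3⟩)
      · exact Or.inl h1
      · exact Or.inr ⟨h2, l, List.mem_cons_self, h3⟩
      · exact Or.inr ⟨h2, l', List.mem_cons_of_mem _ hl', h3⟩
    · rintro (h1 | ⟨h2, l', hl', h3⟩)
      · exact Or.inl (Or.inl h1)
      · rcases List.mem_cons.mp hl' with rfl | hl'
        · exact Or.inl (Or.inr ⟨h2, h3⟩)
        · exact Or.inr ⟨h2, l', hl', h3⟩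

theorem nodup_remove (rest : List String) (s : List Char) (acc : PySem.Set Char) (h : acc.Nodup) :
    (rest.foldl (fun remove l =>
        s.foldl (fun r c => if !(l.toList.contains c) then PySem.Set.add r c else r) remove) acc).Nodup := by
  induction rest generalizing acc with
  | nil => simpa
  | cons l rest ih =>
    exact ih _ (nodup_inner _ _ _ h)

-- B's presence counter: getD c 0 = number of lines of rest containing c
theorem getD_presence (rest : List String) (d : PySem.Dict Char Int) (c : Char) :
    (rest.foldl (fun d l =>
        (PySem.Set.ofList l.toList).foldl (fun d c => d.modify c 0 (· + 1)) d) d).getD c 0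
      = d.getD c 0 + (rest.countP (fun l => l.toList.contains c) : Int) := by
  induction rest generalizing d with
  | nil => simp
  | cons l rest ih =>
    simp only [List.foldl_cons, ih, PySem.Dict.getD_foldl_modify_add_one, List.countP_cons]
    have hcount : (PySem.Set.ofList l.toList).count c
        = if l.toList.contains c then 1 else 0 := by
      by_cases hm : c ∈ l.toList
      · have h1 : c ∈ PySem.Set.ofList l.toList := (PySem.Set.mem_ofList _ _).mpr hm
        rw [List.count_eq_one_of_mem (PySem.Set.nodup_ofList _) h1]
        simp [hm]
      · have h1 : c ∉ PySem.Set.ofList l.toList := fun h => hm ((PySem.Set.mem_ofList _ _).mp h)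
        rw [List.count_eq_zero.mpr h1]
        simp [hm]
    rw [hcount]
    by_cases hc : l.toList.contains c <;> simp [hc] <;> ring

-- |remove| = number of distinct chars of first missing from some line of rest
theorem remove_length_eq (g : String) (rest : List String) :
    (rest.foldl (fun remove l =>
        g.toList.foldl (fun r c => if !(l.toList.contains c) then PySem.Set.add r c else r) remove)
        PySem.Set.empty).length
    = ((PySem.Set.ofList g.toList).filter
        (fun c => decide (∃ l ∈ rest, c ∉ l.toList))).length := by
  set R := rest.foldl (fun remove l =>
      g.toList.foldl (fun r c => if !(l.toList.contains c) then PySem.Set.add r c else r) remove)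
      PySem.Set.empty with hR
  have hRn : R.Nodup := nodup_remove _ _ _ (by simp [PySem.Set.empty])
  have hFn : ((PySem.Set.ofList g.toList).filter
      (fun c => decide (∃ l ∈ rest, c ∉ l.toList))).Nodup :=
    (PySem.Set.nodup_ofList _).filter _
  have hperm : R.Perm ((PySem.Set.ofList g.toList).filter
      (fun c => decide (∃ l ∈ rest, c ∉ l.toList))) := by
    rw [List.perm_ext_iff_of_nodup hRn hFn]
    intro x
    rw [hR, mem_remove]
    simp [PySem.Set.empty, PySem.Set.mem_ofList]
  exact hperm.length_eq

-- countP < length ↔ some line misses c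
theorem countP_lt_iff (rest : List String) (c : Char) :
    ((rest.countP (fun l => l.toList.contains c) : Int) < (rest.length : Int)) ↔
      ∃ l ∈ rest, c ∉ l.toList := by
  have hle : rest.countP (fun l => l.toList.contains c) ≤ rest.length :=
    List.countP_le_length
  constructor
  · intro h
    have hne : rest.countP (fun l => l.toList.contains c) ≠ rest.length := by
      intro he; rw [he] at h; exact lt_irrefl _ h
    have : ¬ ∀ l ∈ rest, (l.toList.contains c) = true := by
      intro hall
      exact hne (List.countP_eq_length.mpr hall)
    push Not at this
    obtain ⟨l, hl, hnc⟩ := this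
    exact ⟨l, hl, by simpa using hnc⟩
  · rintro ⟨l, hl, hnc⟩
    have hne : rest.countP (fun l => l.toList.contains c) ≠ rest.length := by
      intro he
      have := List.countP_eq_length.mp he l hl
      simp at this
      exact hnc this
    omega

-- ===== VERDICT (by name: the statement is the Claim_ definition above) =====
theorem count_spec : Claim_equal_count := by
  intro group _ hpre
  match group with
  | [] => exact absurd rfl hpre
  | g :: rest =>
    show count (g :: rest) = count_alt (g :: rest)
    simp only [count, count_alt]
    rw [remove_length_eq]
    congr 2
    congr 1
    apply List.filter_congr
    intro c _
    rw [getD_presence]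
    simp only [show (PySem.Dict.empty : PySem.Dict Char Int).getD c 0 = 0 from rfl, zero_add]
    exact decide_eq_decide.mpr (countP_lt_iff rest c).symm
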